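-- pv_equiv track=rewrite | github.com/SebTee/foobarGoogle | distract-the-trainers/solution.py | get_initial_matching
-- ===== SOURCE A (Python) =====
-- def get_initial_matching(graph):  # greedy matching algorithm
--     num_nodes = len(graph)
--     matchings = {}
--     for i in range(num_nodes):
--         for j in range(i + 1, num_nodes):
--             if i not in matchings and j not in matchings and i in graph[j]:
--                 matchings[i], matchings[j] = j, i
--     return matchings
-- ===== SOURCE B (Python) =====
-- def get_initial_matching(graph):  # reverse-adjacency index, then one greedy pass
--     rev = {}
--     for j, nbrs in enumerate(graph):
--         for x in set(nbrs):
--             rev.setdefault(x, []).append(j)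
--     matchings = {}
--     for i in range(len(graph)):
--         if i not in matchings:
--             for j in rev.get(i, []):
--                 if j > i and j not in matchings:
--                     matchings[i], matchings[j] = j, i
--                     break
--     return matchings
-- ===== Notes on version B (the rewrite author's own statement) =====
-- stated objective: alternative
-- what changed: A scans all ordered pairs (i, j) testing 'i in graph[j]' each time; B builds a reverse-adjacency index (node -> ascending list of rows containing it) in one pass over the edges and then, for each unmatched i, scans only i's candidate list for the first unmatched j > i.
import Mathlib
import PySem

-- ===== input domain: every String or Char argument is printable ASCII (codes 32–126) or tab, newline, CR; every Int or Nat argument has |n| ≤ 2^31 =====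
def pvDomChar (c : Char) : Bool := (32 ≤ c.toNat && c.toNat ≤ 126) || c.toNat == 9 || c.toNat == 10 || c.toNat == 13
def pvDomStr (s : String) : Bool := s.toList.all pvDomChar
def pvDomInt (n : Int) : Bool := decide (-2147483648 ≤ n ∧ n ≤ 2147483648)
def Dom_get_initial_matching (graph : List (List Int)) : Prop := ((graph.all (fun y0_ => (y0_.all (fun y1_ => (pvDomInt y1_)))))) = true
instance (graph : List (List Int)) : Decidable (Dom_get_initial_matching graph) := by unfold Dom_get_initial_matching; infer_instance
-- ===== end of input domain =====

-- Alternative algorithm: instead of A's all-pairs scan, B builds a reverse-adjacency index in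
-- one pass over the edges, then a single greedy pass scans each unmatched node's candidate list.

-- ===== PORT A =====
-- A-side helpers: the body of the inner 'for j' loop, and the inner loop itself
def gimBodyA (graph : List (List Int)) (i : Int) (m : PySem.Dict Int Int) (j : Int) : PySem.Dict Int Int :=
  if !m.contains i && !m.contains j && (PySem.List.pyGetD graph j []).contains i then
    (m.insert i j).insert j i
  else m

def gimStepA (graph : List (List Int)) (m : PySem.Dict Int Int) (i : Int) : PySem.Dict Int Int :=
  (PySem.List.pyRange (i + 1) (graph.length : Int) 1).foldl (gimBodyA graph i) m

def get_initial_matching (graph : List (List Int)) : List (Int × Int) :=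
  ((PySem.List.pyRange 0 (graph.length : Int) 1).foldl (gimStepA graph) PySem.Dict.empty).items

-- ===== PORT B =====
-- B-side helpers: the reverse-adjacency index, the 'for j in rev.get(i, []) … break' loop,
-- and the body of the outer 'for i' loop
def gimRev (graph : List (List Int)) : PySem.Dict Int (List Int) :=
  (PySem.List.enumerate graph).foldl
    (fun r p => (PySem.Set.ofList p.2).foldl (fun r x => r.modify x [] (· ++ [p.1])) r)
    PySem.Dict.empty

def gimScan (i : Int) (m : PySem.Dict Int Int) : List Int → PySem.Dict Int Int
  | [] => m
  | j :: rest =>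
    if i < j && !m.contains j then (m.insert i j).insert j i
    else gimScan i m rest

def gimStepB (rev : PySem.Dict Int (List Int)) (m : PySem.Dict Int Int) (i : Int) : PySem.Dict Int Int :=
  if !m.contains i then gimScan i m (rev.getD i []) else m

def get_initial_matching_alt (graph : List (List Int)) : List (Int × Int) :=
  ((PySem.List.pyRange 0 (graph.length : Int) 1).foldl (gimStepB (gimRev graph)) PySem.Dict.empty).items

-- ===== PRECONDITION & SPEC =====
def Spec_get_initial_matching (graph : List (List Int)) (out : List (Int × Int)) : Prop := out = get_initial_matching_alt graph
instance (graph : List (List Int)) (out : List (Int × Int)) : Decidable (Spec_get_initial_matching graph out) := by unfold Spec_get_initial_matching; infer_instance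

-- ===== CLAIM (what is proved, stated in full; the proofs are below) =====
def Claim_equal_get_initial_matching : Prop := ∀ (graph : List (List Int)), Dom_get_initial_matching graph → Spec_get_initial_matching graph (get_initial_matching graph)

-- ===== LEMMAS AND PROOFS =====

-- both matching insertions make node i matched
theorem gim_contains_after (m : PySem.Dict Int Int) (i j : Int) :
    ((m.insert i j).insert j i).contains i = true := by
  simp [PySem.Dict.contains_insert]

-- A's inner loop is a no-op once i is matched
theorem gim_foldA_of_contains (graph : List (List Int)) (i : Int) (L : List Int)
    (m : PySem.Dict Int Int) (h : m.contains i = true) :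
    L.foldl (gimBodyA graph i) m = m := by
  induction L with
  | nil => rfl
  | cons j rest ih => simp [List.foldl_cons, gimBodyA, h, ih]

-- A's inner loop matches i with the FIRST eligible j of the list
theorem gim_foldA_find (graph : List (List Int)) (i : Int) (L : List Int)
    (m : PySem.Dict Int Int) (h : m.contains i = false) :
    L.foldl (gimBodyA graph i) m =
      match L.find? (fun j => !m.contains j && (PySem.List.pyGetD graph j []).contains i) with
      | some j => (m.insert i j).insert j i
      | none => m := by
  induction L with
  | nil => rfl
  | cons j rest ih =>
    rw [List.foldl_cons, List.find?_cons]
    have hbody : gimBodyA graph i m j =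
        if (!m.contains j && (PySem.List.pyGetD graph j []).contains i) = true
        then (m.insert i j).insert j i else m := by
      simp only [gimBodyA, h, Bool.not_false, Bool.true_and]
    by_cases hc : (!m.contains j && (PySem.List.pyGetD graph j []).contains i) = true
    · rw [hbody, if_pos hc, hc,
        gim_foldA_of_contains graph i rest _ (gim_contains_after m i j)]
    · have hcf : (!m.contains j && (PySem.List.pyGetD graph j []).contains i) = false := by
        simpa using hc
      rw [hbody, if_neg hc, hcf]
      exact ih

-- B's scan-with-break matches i with the FIRST eligible j of the list
theorem gim_scan_find (i : Int) (m : PySem.Dict Int Int) (L : List Int) :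
    gimScan i m L =
      match L.find? (fun j => i < j && !m.contains j) with
      | some j => (m.insert i j).insert j i
      | none => m := by
  induction L with
  | nil => rfl
  | cons j rest ih =>
    rw [gimScan, List.find?_cons]
    by_cases hc : (i < j && !m.contains j) = true
    · rw [if_pos hc, hc]
    · have hcf : (i < j && !m.contains j) = false := by simpa using hc
      rw [if_neg hc, hcf]
      exact ih

-- the setdefault/append loop over one (deduplicated) neighbour list, at an untouched key
theorem gim_modifyFold_getD_notmem (j x : Int) (ys : List Int) (hx : x ∉ ys)
    (r : PySem.Dict Int (List Int)) :
    (ys.foldl (fun r y => r.modify y [] (· ++ [j])) r).getD x [] = r.getD x [] := by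
  induction ys generalizing r with
  | nil => rfl
  | cons y rest ih =>
    simp only [List.mem_cons, not_or] at hx
    rw [List.foldl_cons, ih hx.2, PySem.Dict.getD_modify_of_ne _ _ _ hx.1]

-- the setdefault/append loop over one (deduplicated) neighbour list
theorem gim_modifyFold_getD (j x : Int) (ys : List Int) (hnd : ys.Nodup)
    (r : PySem.Dict Int (List Int)) :
    (ys.foldl (fun r y => r.modify y [] (· ++ [j])) r).getD x [] =
      r.getD x [] ++ (if x ∈ ys then [j] else []) := by
  induction ys generalizing r with
  | nil => simp
  | cons y rest ih =>
    rcases List.nodup_cons.mp hnd with ⟨hy, hrest⟩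
    by_cases hxy : x = y
    · subst hxy
      rw [List.foldl_cons, gim_modifyFold_getD_notmem j x rest hy,
        PySem.Dict.getD_modify_self]
      simp
    · rw [List.foldl_cons, ih hrest, PySem.Dict.getD_modify_of_ne _ _ _ hxy]
      simp [hxy]

-- the reverse index: rev.get(x, []) lists exactly the rows whose list contains x, in order
theorem gim_rev_fold (x : Int) (l : List (List Int)) (s : Int) (r : PySem.Dict Int (List Int)) :
    ((PySem.List.enumerate l s).foldl
        (fun r p => (PySem.Set.ofList p.2).foldl (fun r y => r.modify y [] (· ++ [p.1])) r)
        r).getD x [] =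
      r.getD x [] ++ ((PySem.List.enumerate l s).filter (fun p => p.2.contains x)).map (·.1) := by
  induction l generalizing s r with
  | nil => simp [PySem.List.enumerate]
  | cons ys rest ih =>
    rw [PySem.List.enumerate_cons]
    rw [List.foldl_cons, List.filter_cons, ih,
      gim_modifyFold_getD s x _ (PySem.Set.nodup_ofList ys) r]
    by_cases hx : x ∈ ys
    · simp [hx, PySem.Set.mem_ofList, List.append_assoc]
    · simp [hx, PySem.Set.mem_ofList]

theorem gim_rev_getD (graph : List (List Int)) (x : Int) :
    (gimRev graph).getD x [] =
      ((PySem.List.enumerate graph).filter (fun p => p.2.contains x)).map (·.1) := by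
  simpa using gim_rev_fold x graph 0 PySem.Dict.empty

-- indexing one step into a cons cell
theorem gim_pyGetD_cons_of_pos (a : List Int) (l : List (List Int)) (t : Int) (ht : 1 ≤ t) :
    PySem.List.pyGetD (a :: l) t [] = PySem.List.pyGetD l (t - 1) [] := by
  obtain ⟨k, rfl⟩ : ∃ k : Nat, t = (k : Int) + 1 := ⟨(t - 1).toNat, by omega⟩
  rw [show ((k : Int) + 1) = ((k + 1 : Nat) : Int) by push_cast; ring,
    PySem.List.pyGetD_natCast,
    show (((k + 1 : Nat) : Int) - 1) = ((k : Nat) : Int) by push_cast; ring,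
    PySem.List.pyGetD_natCast]
  simp

-- an entry of enumerate is the row at its index
theorem gim_mem_enumerate_snd (l : List (List Int)) (s : Int) (p : Int × List Int)
    (hp : p ∈ PySem.List.enumerate l s) : p.2 = PySem.List.pyGetD l (p.1 - s) [] := by
  induction l generalizing s with
  | nil => simp [PySem.List.enumerate] at hp
  | cons a rest ih =>
    rw [PySem.List.enumerate_cons] at hp
    rcases List.mem_cons.mp hp with h | h
    · subst h; simp [PySem.List.pyGetD_zero_cons]
    · have hs : s + 1 ≤ p.1 := by
        have : p.1 ∈ (PySem.List.enumerate rest (s + 1)).map (·.1) := List.mem_map_of_mem h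
        rw [PySem.List.map_fst_enumerate] at this
        exact (PySem.List.mem_pyRange_one.mp this).1
      rw [gim_pyGetD_cons_of_pos a rest (p.1 - s) (by omega)]
      have := ih (s + 1) h
      rw [this]
      congr 1
      ring

-- the candidate list of node i, as a filtered index range
theorem gim_cand_eq (graph : List (List Int)) (i : Int) :
    ((PySem.List.enumerate graph).filter (fun p => p.2.contains i)).map (·.1) =
      (PySem.List.pyRange 0 (graph.length : Int) 1).filter
        (fun j => (PySem.List.pyGetD graph j []).contains i) := by
  have h1 : (PySem.List.enumerate graph).filter (fun p => p.2.contains i) =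
      (PySem.List.enumerate graph).filter
        (fun p => (PySem.List.pyGetD graph p.1 []).contains i) := by
    apply List.filter_congr
    intro p hp
    rw [show PySem.List.pyGetD graph p.1 [] = PySem.List.pyGetD graph (p.1 - 0) [] by norm_num,
      ← gim_mem_enumerate_snd graph 0 p hp]
  have h2 : ∀ (l : List (Int × List Int)) (q : Int → Bool),
      (l.filter (fun p => q p.1)).map (·.1) = (l.map (·.1)).filter q := by
    intro l q
    induction l with
    | nil => rfl
    | cons p rest ih => by_cases hq : q p.1 <;> simp [hq, ih]
  rw [h1, h2 (PySem.List.enumerate graph) (fun j => (PySem.List.pyGetD graph j []).contains i),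
    PySem.List.map_fst_enumerate]
  norm_num

-- first eligible j in (i, n) = first eligible j among i's candidates above i
theorem gim_find_eq (graph : List (List Int)) (i : Int) (m : PySem.Dict Int Int)
    (hi0 : 0 ≤ i) (hin : i < (graph.length : Int)) :
    (PySem.List.pyRange (i + 1) (graph.length : Int) 1).find?
        (fun j => !m.contains j && (PySem.List.pyGetD graph j []).contains i) =
      ((PySem.List.pyRange 0 (graph.length : Int) 1).filter
          (fun j => (PySem.List.pyGetD graph j []).contains i)).find?
        (fun j => i < j && !m.contains j) := by
  rw [List.find?_filter,
    PySem.List.pyRange_one_append 0 (i + 1) (graph.length : Int) (by omega) (by omega),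
    List.find?_append]
  have h1 : (PySem.List.pyRange 0 (i + 1) 1).find?
      (fun a => decide ((PySem.List.pyGetD graph a []).contains i = true ∧
        (i < a && !m.contains a) = true)) = none := by
    rw [List.find?_eq_none]
    intro j hj
    have := (PySem.List.mem_pyRange_one.mp hj).2
    simp only [decide_eq_true_eq, not_and]
    intro _
    simp
    omega
  rw [h1, Option.none_or]
  have hcong : ∀ (L : List Int), (∀ j ∈ L, i < j) →
      L.find? (fun j => !m.contains j && (PySem.List.pyGetD graph j []).contains i) =
      L.find? (fun a => decide ((PySem.List.pyGetD graph a []).contains i = true ∧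
        (i < a && !m.contains a) = true)) := by
    intro L hL
    induction L with
    | nil => rfl
    | cons j rest ih =>
      have hij : i < j := hL j (List.mem_cons_self ..)
      rw [List.find?_cons, List.find?_cons, ih (fun x hx => hL x (List.mem_cons_of_mem _ hx))]
      congr 1
      simp [hij, Bool.and_comm]
  exact hcong _ (fun j hj => by
    have := (PySem.List.mem_pyRange_one.mp hj).1
    omega)

-- the two outer-loop bodies agree on every state and every index of the range
theorem gim_step_eq (graph : List (List Int)) (m : PySem.Dict Int Int) (i : Int)
    (hi : i ∈ PySem.List.pyRange 0 (graph.length : Int) 1) :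
    gimStepA graph m i = gimStepB (gimRev graph) m i := by
  rcases PySem.List.mem_pyRange_one.mp hi with ⟨hi0, hin⟩
  by_cases h : m.contains i = true
  · rw [gimStepA, gimStepB, gim_foldA_of_contains graph i _ m h, h]
    rfl
  · have h' : m.contains i = false := by simpa using h
    rw [gimStepA, gimStepB, gim_foldA_find graph i _ m h', h', gim_rev_getD, gim_cand_eq,
      gim_find_eq graph i m hi0 hin, gim_scan_find]
    rfl

-- ===== VERDICT (by name: the statement is the Claim_ definition above) =====
theorem get_initial_matching_spec : Claim_equal_get_initial_matching := by
  intro graph _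
  unfold Spec_get_initial_matching get_initial_matching get_initial_matching_alt
  exact congrArg PySem.Dict.items
    (PySem.List.foldl_congr_mem _ _ _ _ (fun acc i hi => gim_step_eq graph acc i hi))
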